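-- pv_equiv track=rewrite | github.com/TerenceTan/competitor-intel | scrapers/apify_social.py | _fb_group_by_slug
-- ===== SOURCE A (Python) =====
-- def _fb_group_by_slug(items: list[dict], slugs: list[str]) -> dict[str, list[dict]]:
--     """Group posts by which page they came from. Match on the page slug
--     appearing in pageUrl / url / facebookUrl."""
--     out: dict[str, list[dict]] = {s.lower(): [] for s in slugs}
--     for post in items:
--         url = (post.get("pageUrl") or post.get("url") or post.get("facebookUrl") or "").lower()
--         for s in slugs:
--             sl = s.lower()
--             if f"/{sl}" in url or f"facebook.com/{sl}" in url:
--                 out[sl].append(post)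
--                 break
--     return out
-- ===== SOURCE B (Python) =====
-- def _fb_group_by_slug(items: list[dict], slugs: list[str]) -> dict[str, list[dict]]:
--     """Group posts by page slug, slug-outer: each slug in turn claims its
--     matching posts from the pool of still-unassigned posts."""
--     out: dict[str, list[dict]] = {s.lower(): [] for s in slugs}
--     remaining = list(items)
--     for s in slugs:
--         sl = s.lower()
--         matched = [p for p in remaining if _matches(p, sl)]
--         remaining = [p for p in remaining if not _matches(p, sl)]
--         out[sl].extend(matched)
--     return out
--
--
-- def _matches(post: dict, sl: str) -> bool:
--     url = (post.get("pageUrl") or post.get("url") or post.get("facebookUrl") or "").lower()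
--     return f"/{sl}" in url or f"facebook.com/{sl}" in url
-- ===== Notes on version B (the rewrite author's own statement) =====
-- stated objective: alternative
-- what changed: Inverts the loop nesting: instead of scanning the slug list per post with a break, B sweeps a shrinking pool of unassigned posts once per slug, removing each post from the pool the first time a slug claims it (same first-match-wins result).
import Mathlib
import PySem

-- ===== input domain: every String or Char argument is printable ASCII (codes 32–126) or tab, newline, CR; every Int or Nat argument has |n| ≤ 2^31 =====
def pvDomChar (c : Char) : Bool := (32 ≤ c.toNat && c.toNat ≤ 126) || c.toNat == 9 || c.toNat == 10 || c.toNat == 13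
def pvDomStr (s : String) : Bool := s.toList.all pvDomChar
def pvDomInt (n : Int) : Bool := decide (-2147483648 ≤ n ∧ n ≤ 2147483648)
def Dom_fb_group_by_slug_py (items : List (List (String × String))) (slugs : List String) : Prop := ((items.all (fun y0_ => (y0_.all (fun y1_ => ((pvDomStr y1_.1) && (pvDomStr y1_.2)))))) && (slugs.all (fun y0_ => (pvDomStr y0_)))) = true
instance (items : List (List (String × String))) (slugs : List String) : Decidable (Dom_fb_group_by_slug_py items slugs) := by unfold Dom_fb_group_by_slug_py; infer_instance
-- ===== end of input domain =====

-- B inverts the loop nesting (slug-outer over a shrinking pool of unassigned posts)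
-- instead of A's post-outer scan of the slug list with a break; same result, similar cost.

-- ===== PORT A =====
-- (post.get("pageUrl") or post.get("url") or post.get("facebookUrl") or "").lower()
def pvOr (a : Option String) (b : String) : String :=
  match a with
  | none => b
  | some s => if s = "" then b else s

def pvUrl (post : List (String × String)) : String :=
  PySem.Str.lower (pvOr ((PySem.Dict.mk post).get? "pageUrl")
    (pvOr ((PySem.Dict.mk post).get? "url")
      (pvOr ((PySem.Dict.mk post).get? "facebookUrl") "")))

-- A's inner 'for s in slugs: … break' loop for one post
def pvAssignA (d : PySem.Dict String (List (List (String × String))))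
    (post : List (String × String)) (url : String) :
    List String → PySem.Dict String (List (List (String × String)))
  | [] => d
  | s :: rest =>
    let sl := PySem.Str.lower s
    if PySem.Str.isIn ("/" ++ sl) url || PySem.Str.isIn ("facebook.com/" ++ sl) url then
      d.modify sl [] (· ++ [post])
    else
      pvAssignA d post url rest

def fb_group_by_slug_py (items : List (List (String × String))) (slugs : List String) : List (String × List (List (String × String))) :=
  let out := slugs.foldl (fun d s => d.insert (PySem.Str.lower s) ([] : List (List (String × String)))) PySem.Dict.empty
  let out := items.foldl (fun d post =>
    let url := pvUrl post
    pvAssignA d post url slugs) out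
  out.items

-- ===== PORT B =====
def pvMatches (post : List (String × String)) (sl : String) : Bool :=
  let url := pvUrl post
  PySem.Str.isIn ("/" ++ sl) url || PySem.Str.isIn ("facebook.com/" ++ sl) url

def fb_group_by_slug_py_alt (items : List (List (String × String))) (slugs : List String) : List (String × List (List (String × String))) :=
  let out := slugs.foldl (fun d s => d.insert (PySem.Str.lower s) ([] : List (List (String × String)))) PySem.Dict.empty
  let st := slugs.foldl (fun (st : PySem.Dict String (List (List (String × String))) × List (List (String × String))) s =>
    let sl := PySem.Str.lower s
    let matched := st.2.filter (fun post => pvMatches post sl)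
    let leftover := st.2.filter (fun post => !(pvMatches post sl))
    (st.1.modify sl [] (· ++ matched), leftover)) (out, items)
  st.1.items

-- ===== PRECONDITION & SPEC =====
def Spec_fb_group_by_slug_py (items : List (List (String × String))) (slugs : List String) (out : List (String × List (List (String × String)))) : Prop := out = fb_group_by_slug_py_alt items slugs
instance (items : List (List (String × String))) (slugs : List String) (out : List (String × List (List (String × String)))) : Decidable (Spec_fb_group_by_slug_py items slugs out) := by unfold Spec_fb_group_by_slug_py; infer_instance

-- ===== CLAIM (what is proved, stated in full; the proofs are below) =====
def Claim_equal_fb_group_by_slug_py : Prop := ∀ (items : List (List (String × String))) (slugs : List String), Dom_fb_group_by_slug_py items slugs → Spec_fb_group_by_slug_py items slugs (fb_group_by_slug_py items slugs)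

-- ===== LEMMAS AND PROOFS =====

-- the lowered slug of the first slug in the list that matches the post
def pvFirst (post : List (String × String)) : List String → Option String
  | [] => none
  | s :: rest =>
    if pvMatches post (PySem.Str.lower s) then some (PySem.Str.lower s) else pvFirst post rest

theorem pvFirst_matches (post : List (String × String)) (L : List String) (k : String)
    (h : pvFirst post L = some k) : pvMatches post k = true := by
  induction L with
  | nil => simp [pvFirst] at h
  | cons s rest ih =>
    by_cases hm : pvMatches post (PySem.Str.lower s) = true
    · simp [pvFirst, hm] at h; rw [← h]; exact hm
    · simp [pvFirst, hm] at h; exact ih h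

theorem pvAssignA_getD (post : List (String × String)) (k : String) :
    ∀ (L : List String) (d : PySem.Dict String (List (List (String × String)))),
    (pvAssignA d post (pvUrl post) L).getD k [] =
      d.getD k [] ++ (if pvFirst post L = some k then [post] else []) := by
  intro L
  induction L with
  | nil => intro d; simp [pvAssignA, pvFirst]
  | cons s rest ih =>
    intro d
    by_cases hm : pvMatches post (PySem.Str.lower s) = true
    · have hc : (PySem.Str.isIn ("/" ++ PySem.Str.lower s) (pvUrl post) ||
          PySem.Str.isIn ("facebook.com/" ++ PySem.Str.lower s) (pvUrl post)) = true := hm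
      simp only [pvAssignA, hc, reduceIte, pvFirst, if_pos hm]
      rw [PySem.Dict.getD_modify]
      by_cases hk : k = PySem.Str.lower s
      · simp [hk]
      · rw [if_neg hk]
        simp [Ne.symm hk]
    · have hc : (PySem.Str.isIn ("/" ++ PySem.Str.lower s) (pvUrl post) ||
          PySem.Str.isIn ("facebook.com/" ++ PySem.Str.lower s) (pvUrl post)) = false :=
        Bool.of_not_eq_true hm
      simp only [pvAssignA, hc, pvFirst, if_neg hm, Bool.false_eq_true, reduceIte]
      exact ih d

theorem pvAssignA_keys (post : List (String × String)) :
    ∀ (L : List String) (d : PySem.Dict String (List (List (String × String)))),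
    (∀ s ∈ L, PySem.Str.lower s ∈ d.keys) →
    (pvAssignA d post (pvUrl post) L).keys = d.keys := by
  intro L
  induction L with
  | nil => intro d _; simp [pvAssignA]
  | cons s rest ih =>
    intro d hmem
    by_cases hm : pvMatches post (PySem.Str.lower s) = true
    · have hc : (PySem.Str.isIn ("/" ++ PySem.Str.lower s) (pvUrl post) ||
          PySem.Str.isIn ("facebook.com/" ++ PySem.Str.lower s) (pvUrl post)) = true := hm
      simp only [pvAssignA, hc, reduceIte]
      have : d.contains (PySem.Str.lower s) = true := by
        rw [PySem.Dict.contains_iff_mem_keys]; exact hmem s (by simp)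
      rw [PySem.Dict.keys_modify, PySem.Dict.keys_insert_of_contains _ _ this]
    · have hc : (PySem.Str.isIn ("/" ++ PySem.Str.lower s) (pvUrl post) ||
          PySem.Str.isIn ("facebook.com/" ++ PySem.Str.lower s) (pvUrl post)) = false :=
        Bool.of_not_eq_true hm
      simp only [pvAssignA, hc, Bool.false_eq_true, reduceIte]
      exact ih d (fun t ht => hmem t (by simp [ht]))

theorem pvFoldA_getD (slugs : List String) (k : String) :
    ∀ (items : List (List (String × String))) (d : PySem.Dict String (List (List (String × String)))),
    (items.foldl (fun d post => pvAssignA d post (pvUrl post) slugs) d).getD k [] =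
      d.getD k [] ++ items.filter (fun p => pvFirst p slugs == some k) := by
  intro items
  induction items with
  | nil => intro d; simp
  | cons p rest ih =>
    intro d
    simp only [List.foldl_cons, List.filter_cons]
    rw [ih, pvAssignA_getD]
    by_cases h : pvFirst p slugs = some k
    · simp [h]
    · simp [h]

theorem pvFoldA_keys (slugs : List String) :
    ∀ (items : List (List (String × String))) (d : PySem.Dict String (List (List (String × String)))),
    (∀ s ∈ slugs, PySem.Str.lower s ∈ d.keys) →
    (items.foldl (fun d post => pvAssignA d post (pvUrl post) slugs) d).keys = d.keys := by
  intro items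
  induction items with
  | nil => intro d _; simp
  | cons p rest ih =>
    intro d hmem
    simp only [List.foldl_cons]
    rw [ih _ (fun s hs => by rw [pvAssignA_keys p slugs d hmem]; exact hmem s hs),
      pvAssignA_keys p slugs d hmem]

theorem pvFirst_cons_eq (p : List (String × String)) (s : String) (rest : List String) (k : String)
    (hk : k ≠ PySem.Str.lower s) :
    (pvFirst p (s :: rest) == some k) =
      (!(pvMatches p (PySem.Str.lower s)) && (pvFirst p rest == some k)) := by
  by_cases hm : pvMatches p (PySem.Str.lower s) = true
  · simp [pvFirst, hm, Ne.symm hk]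
  · simp [pvFirst, Bool.of_not_eq_true hm]

theorem pvFoldB_getD (k : String) :
    ∀ (L : List String) (d : PySem.Dict String (List (List (String × String)))) (rem : List (List (String × String))),
    (L.foldl (fun (st : PySem.Dict String (List (List (String × String))) × List (List (String × String))) s =>
      (st.1.modify (PySem.Str.lower s) [] (· ++ st.2.filter (fun post => pvMatches post (PySem.Str.lower s))),
       st.2.filter (fun post => !(pvMatches post (PySem.Str.lower s))))) (d, rem)).1.getD k [] =
      d.getD k [] ++ rem.filter (fun p => pvFirst p L == some k) := by
  intro L
  induction L with
  | nil =>
    intro d rem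
    simp [pvFirst]
  | cons s rest ih =>
    intro d rem
    simp only [List.foldl_cons]
    rw [ih]
    rw [PySem.Dict.getD_modify]
    by_cases hk : k = PySem.Str.lower s
    · rw [if_pos hk]
      have h1 : (rem.filter (fun post => !(pvMatches post (PySem.Str.lower s)))).filter
          (fun p => pvFirst p rest == some k) = [] := by
        rw [List.filter_eq_nil_iff]
        intro p hp
        rw [List.mem_filter] at hp
        intro hfm
        have hpm : pvMatches p k = true := pvFirst_matches p rest k (by simpa using hfm)
        rw [hk] at hpm
        simp [hpm] at hp
      have h2 : rem.filter (fun p => pvFirst p (s :: rest) == some k) =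
          rem.filter (fun p => pvMatches p (PySem.Str.lower s)) := by
        apply List.filter_congr
        intro p _
        by_cases hm : pvMatches p (PySem.Str.lower s) = true
        · simp [pvFirst, hm, hk]
        · have hm' : pvMatches p (PySem.Str.lower s) = false := Bool.of_not_eq_true hm
          simp only [pvFirst, hm', Bool.false_eq_true, reduceIte]
          have hne : pvFirst p rest ≠ some k := fun h => by
            have := pvFirst_matches p rest k h; rw [hk] at this; simp [this] at hm'
          simp [hne]
      rw [h1, h2, ← hk]
      simp
    · rw [if_neg hk]
      have h3 : (rem.filter (fun post => !(pvMatches post (PySem.Str.lower s)))).filter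
          (fun p => pvFirst p rest == some k) =
          rem.filter (fun p => pvFirst p (s :: rest) == some k) := by
        rw [List.filter_filter]
        apply List.filter_congr
        intro p _
        rw [pvFirst_cons_eq p s rest k hk]
        rw [Bool.and_comm]
      rw [h3]

-- keys of B's slug fold: each step modifies at a key already present
theorem pvFoldB_keys :
    ∀ (L : List String) (d : PySem.Dict String (List (List (String × String)))) (rem : List (List (String × String))),
    (∀ s ∈ L, PySem.Str.lower s ∈ d.keys) →
    (L.foldl (fun (st : PySem.Dict String (List (List (String × String))) × List (List (String × String))) s =>
      (st.1.modify (PySem.Str.lower s) [] (· ++ st.2.filter (fun post => pvMatches post (PySem.Str.lower s))),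
       st.2.filter (fun post => !(pvMatches post (PySem.Str.lower s))))) (d, rem)).1.keys = d.keys := by
  intro L
  induction L with
  | nil => intro d rem _; simp
  | cons s rest ih =>
    intro d rem hmem
    simp only [List.foldl_cons]
    have hc : d.contains (PySem.Str.lower s) = true := by
      rw [PySem.Dict.contains_iff_mem_keys]; exact hmem s (by simp)
    have hkeys : (d.modify (PySem.Str.lower s) []
        (· ++ rem.filter (fun post => pvMatches post (PySem.Str.lower s)))).keys = d.keys := by
      rw [PySem.Dict.keys_modify, PySem.Dict.keys_insert_of_contains _ _ hc]
    rw [ih _ _ (fun t ht => by rw [hkeys]; exact hmem t (by simp [ht]))]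
    exact hkeys

-- ===== VERDICT (by name: the statement is the Claim_ definition above) =====
theorem fb_group_by_slug_py_spec : Claim_equal_fb_group_by_slug_py := by
  intro items slugs _
  unfold Spec_fb_group_by_slug_py fb_group_by_slug_py fb_group_by_slug_py_alt
  show (items.foldl (fun d post => pvAssignA d post (pvUrl post) slugs)
      (slugs.foldl (fun d s => d.insert (PySem.Str.lower s) ([] : List (List (String × String)))) PySem.Dict.empty)).items =
    ((slugs.foldl (fun (st : PySem.Dict String (List (List (String × String))) × List (List (String × String))) s =>
      (st.1.modify (PySem.Str.lower s) [] (· ++ st.2.filter (fun post => pvMatches post (PySem.Str.lower s))),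
       st.2.filter (fun post => !(pvMatches post (PySem.Str.lower s)))))
      ((slugs.foldl (fun d s => d.insert (PySem.Str.lower s) ([] : List (List (String × String)))) PySem.Dict.empty), items)).1).items
  set d0 := slugs.foldl (fun d s => d.insert (PySem.Str.lower s) ([] : List (List (String × String)))) PySem.Dict.empty with hd0
  have hkeys0 : d0.keys = PySem.Set.ofList (slugs.map PySem.Str.lower) := by
    rw [hd0, PySem.Dict.keys_foldl_insert_key]
    simp [PySem.Set.update_nil_left]
  have hmem0 : ∀ s ∈ slugs, PySem.Str.lower s ∈ d0.keys := by
    intro s hs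
    rw [hkeys0, PySem.Set.mem_ofList]
    exact List.mem_map_of_mem hs
  have hnd0 : d0.keys.Nodup := by rw [hkeys0]; exact PySem.Set.nodup_ofList _
  have hAk := pvFoldA_keys slugs items d0 hmem0
  have hBk := pvFoldB_keys slugs d0 items hmem0
  rw [PySem.Dict.items_eq_map_keys _ (by rw [hAk]; exact hnd0) [],
      PySem.Dict.items_eq_map_keys _ (by rw [hBk]; exact hnd0) []]
  rw [hAk, hBk]
  apply List.map_congr_left
  intro k _
  rw [pvFoldA_getD, pvFoldB_getD]
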